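-- pv_equiv track=rewrite | github.com/WarrenKTan/EECS-210 | Tan_Warren_Lab11/Tan_Warren_Lab11/Lab 11.py | minInIndicies
-- ===== SOURCE A (Python) =====
-- def minInIndicies(keys : list, indicies : list):
--     # first value from indicies
--     index = indicies[0]
--     min = keys[indicies[0]]
--     for i in indicies:
--         if keys[i] is None:
--             pass
--         elif min is None or keys[i] < min:
--             index = i
--             min = keys[i]
--     return index, min
-- ===== SOURCE B (Python) =====
-- def minInIndicies(keys : list, indicies : list):
--     # Two-pass: collect non-None key values, take their minimum with builtin min,
--     # then return the first index that attains it.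
--     vals = [keys[i] for i in indicies if keys[i] is not None]
--     if not vals:
--         return indicies[0], keys[indicies[0]]
--     m = min(vals)
--     for i in indicies:
--         if keys[i] == m:
--             return i, m
-- ===== Notes on version B (the rewrite author's own statement) =====
-- stated objective: alternative
-- what changed: Replaces A's single fused min-tracking loop (running index/min state updated under a strict-< guard) with two separate passes: a filter collecting the non-None key values, a builtin min over them, and a first-index search for the minimum.
import Mathlib
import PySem

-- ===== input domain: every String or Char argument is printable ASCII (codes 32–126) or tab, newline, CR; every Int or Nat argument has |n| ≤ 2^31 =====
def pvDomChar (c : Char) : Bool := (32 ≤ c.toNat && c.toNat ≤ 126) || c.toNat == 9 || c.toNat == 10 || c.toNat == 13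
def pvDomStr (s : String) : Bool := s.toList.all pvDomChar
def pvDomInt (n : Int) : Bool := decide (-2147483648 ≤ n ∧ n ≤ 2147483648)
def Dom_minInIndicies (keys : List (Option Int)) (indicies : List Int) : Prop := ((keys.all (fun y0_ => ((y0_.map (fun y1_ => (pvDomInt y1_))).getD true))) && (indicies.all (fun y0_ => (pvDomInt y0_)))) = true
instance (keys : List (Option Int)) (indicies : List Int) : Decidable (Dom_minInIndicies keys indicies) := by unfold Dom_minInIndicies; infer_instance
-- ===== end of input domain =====

-- B replaces A's fused min-tracking loop by filter + builtin min + first-index search (alternative decomposition, same cost).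

-- ===== PORT A =====
-- keys[i] as Python evaluates it (exact under Pre_: index in range)
def pvKey (keys : List (Option Int)) (i : Int) : Option Int :=
  (PySem.List.pyGet? keys i).getD none

-- the body of A's for-loop, state = (index, min)
def pvStepA (keys : List (Option Int)) (s : Int × Option Int) (i : Int) : Int × Option Int :=
  match pvKey keys i with
  | none => s
  | some v =>
    match s.2 with
    | none => (i, some v)
    | some m => if v < m then (i, some v) else s

def minInIndicies (keys : List (Option Int)) (indicies : List Int) : Int × Option Int :=
  indicies.foldl (pvStepA keys)
    ((PySem.List.pyGet? indicies 0).getD 0, pvKey keys ((PySem.List.pyGet? indicies 0).getD 0))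

-- ===== PORT B =====
def minInIndicies_alt (keys : List (Option Int)) (indicies : List Int) : Int × Option Int :=
  match PySem.List.min? (indicies.filterMap (pvKey keys)) (fun v => v) with
  | none =>
    ((PySem.List.pyGet? indicies 0).getD 0, pvKey keys ((PySem.List.pyGet? indicies 0).getD 0))
  | some m =>
    match indicies.find? (fun i => pvKey keys i == some m) with
    | some i => (i, some m)
    | none => (0, none)   -- unreachable: m is a value attained by some index

-- ===== PRECONDITION & SPEC =====
-- Pre_ excludes exactly the inputs where Python A raises IndexError: empty indicies, or an index out of range for keys.
def Pre_minInIndicies (keys : List (Option Int)) (indicies : List Int) : Prop :=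
  indicies ≠ [] ∧ ∀ i ∈ indicies, PySem.Raise.InRange keys.length i
instance (keys : List (Option Int)) (indicies : List Int) : Decidable (Pre_minInIndicies keys indicies) := by unfold Pre_minInIndicies; infer_instance

def pvWitness_minInIndicies : List (Option Int) × List Int := ([some 3, none, some 1], [0, 1, 2])

def Spec_minInIndicies (keys : List (Option Int)) (indicies : List Int) (out : Int × Option Int) : Prop := out = minInIndicies_alt keys indicies
instance (keys : List (Option Int)) (indicies : List Int) (out : Int × Option Int) : Decidable (Spec_minInIndicies keys indicies out) := by unfold Spec_minInIndicies; infer_instance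

-- ===== CLAIM (what is proved, stated in full; the proofs are below) =====
def Claim_equal_minInIndicies : Prop := ∀ (keys : List (Option Int)) (indicies : List Int), Dom_minInIndicies keys indicies → Pre_minInIndicies keys indicies → Spec_minInIndicies keys indicies (minInIndicies keys indicies)

-- ===== LEMMAS AND PROOFS =====

lemma foldl_min_le_init : ∀ (l : List Int) (a : Int), l.foldl min a ≤ a := by
  intro l
  induction l with
  | nil => intro a; simp
  | cons i t ih =>
    intro a
    calc (i :: t).foldl min a = t.foldl min (min a i) := rfl
      _ ≤ min a i := ih _
      _ ≤ a := min_le_left _ _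

lemma foldl_min_comm : ∀ (l : List Int) (a b : Int), l.foldl min (min a b) = min a (l.foldl min b) := by
  intro l
  induction l with
  | nil => intro a b; simp
  | cons c t ih =>
    intro a b
    calc (c :: t).foldl min (min a b) = t.foldl min (min (min a b) c) := rfl
      _ = t.foldl min (min a (min b c)) := by rw [min_assoc]
      _ = min a (t.foldl min (min b c)) := ih _ _
      _ = min a ((c :: t).foldl min b) := rfl

/-- Characterisation of A's loop: from start state `(j, om)`, the fold returns
`(j, om)` when no index yields a non-None key; otherwise, with `m` the minimum of
the non-None key values, it returns the first index attaining `m` (paired with `m`)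
when `om` is None or `m < om`, and keeps `(j, om)` otherwise. -/
lemma foldA_char (keys : List (Option Int)) : ∀ (l : List Int) (j : Int) (om : Option Int),
    (l.filterMap (pvKey keys) = [] → l.foldl (pvStepA keys) (j, om) = (j, om)) ∧
    (∀ v vt, l.filterMap (pvKey keys) = v :: vt →
      ((om = none ∨ ∃ m0, om = some m0 ∧ vt.foldl min v < m0) →
        ∃ i₀, l.find? (fun i => pvKey keys i == some (vt.foldl min v)) = some i₀ ∧
          l.foldl (pvStepA keys) (j, om) = (i₀, some (vt.foldl min v))) ∧
      (∀ m0, om = some m0 → ¬ vt.foldl min v < m0 →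
        l.foldl (pvStepA keys) (j, om) = (j, some m0))) := by
  intro l
  induction l with
  | nil =>
    intro j om
    refine ⟨fun _ => rfl, fun v vt hv => by simp at hv⟩
  | cons i t ih =>
    intro j om
    cases hg : pvKey keys i with
    | none =>
      have hstep : pvStepA keys (j, om) i = (j, om) := by simp [pvStepA, hg]
      have hfm : (i :: t).filterMap (pvKey keys) = t.filterMap (pvKey keys) := by
        simp [hg]
      constructor
      · intro hv
        rw [hfm] at hv
        simpa [List.foldl_cons, hstep] using (ih j om).1 hv
      · intro v vt hv
        rw [hfm] at hv
        obtain ⟨ih1, ih2⟩ := (ih j om).2 v vt hv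
        constructor
        · intro hcase
          obtain ⟨i₀, hf, he⟩ := ih1 hcase
          refine ⟨i₀, ?_, by simpa [List.foldl_cons, hstep] using he⟩
          rw [List.find?_cons_of_neg (by simp [hg])]
          exact hf
        · intro m0 h1 h2
          simpa [List.foldl_cons, hstep] using ih2 m0 h1 h2
    | some w =>
      have hfm : (i :: t).filterMap (pvKey keys) = w :: t.filterMap (pvKey keys) := by
        simp [hg]
      constructor
      · intro hv; rw [hfm] at hv; exact absurd hv (by simp)
      · intro v vt hv
        rw [hfm] at hv
        injection hv with h1 h2
        subst h1
        subst h2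
        -- if the state is replaced by (i, some w), the rest of the fold yields
        -- the first index attaining the minimum of all collected values
        have hrepl : ∃ i₀,
            (i :: t).find? (fun x => pvKey keys x == some ((t.filterMap (pvKey keys)).foldl min w)) = some i₀ ∧
            t.foldl (pvStepA keys) (i, some w) = (i₀, some ((t.filterMap (pvKey keys)).foldl min w)) := by
          cases hvt : t.filterMap (pvKey keys) with
          | nil =>
            refine ⟨i, ?_, ?_⟩
            · exact List.find?_cons_of_pos (by simp [hg])
            · simpa using (ih i (some w)).1 hvt
          | cons x xt =>
            obtain ⟨ih1, ih2⟩ := (ih i (some w)).2 x xt hvt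
            have hm : (x :: xt).foldl min w = min w (xt.foldl min x) := by
              rw [List.foldl_cons]; exact foldl_min_comm xt w x
            by_cases hlt : xt.foldl min x < w
            · obtain ⟨i₀, hf, he⟩ := ih1 (Or.inr ⟨w, rfl, hlt⟩)
              have hmm : (x :: xt).foldl min w = xt.foldl min x := by
                rw [hm]; exact min_eq_right hlt.le
              refine ⟨i₀, ?_, ?_⟩
              · rw [hmm, List.find?_cons_of_neg (by simp [hg]; omega)]
                exact hf
              · rw [hmm]; exact he
            · have he := ih2 w rfl hlt
              have hmm : (x :: xt).foldl min w = w := by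
                rw [hm]; exact min_eq_left (le_of_not_gt hlt)
              refine ⟨i, ?_, ?_⟩
              · rw [hmm]; exact List.find?_cons_of_pos (by simp [hg])
              · rw [hmm]; exact he
        constructor
        · intro hcase
          rcases hcase with h | ⟨m0, hom, hlt2⟩
          · have hstep : pvStepA keys (j, om) i = (i, some w) := by simp [pvStepA, hg, h]
            obtain ⟨i₀, hf, he⟩ := hrepl
            exact ⟨i₀, hf, by simpa [List.foldl_cons, hstep] using he⟩
          · subst hom
            by_cases hw : w < m0
            · have hstep : pvStepA keys (j, some m0) i = (i, some w) := by
                simp [pvStepA, hg, hw]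
              obtain ⟨i₀, hf, he⟩ := hrepl
              exact ⟨i₀, hf, by simpa [List.foldl_cons, hstep] using he⟩
            · -- the head key w is not below m0, so the state survives the head step
              have hstep : pvStepA keys (j, some m0) i = (j, some m0) := by
                simp [pvStepA, hg, hw]
              cases hvt : t.filterMap (pvKey keys) with
              | nil =>
                rw [hvt] at hlt2
                simp at hlt2
                exact absurd hlt2 hw
              | cons x xt =>
                rw [hvt] at hlt2
                obtain ⟨ih1, _⟩ := (ih j (some m0)).2 x xt hvt
                have hm : (x :: xt).foldl min w = min w (xt.foldl min x) := by
                  rw [List.foldl_cons]; exact foldl_min_comm xt w x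
                have hm0w : m0 ≤ w := le_of_not_gt hw
                have hxlt : xt.foldl min x < m0 := by
                  rw [hm] at hlt2
                  rcases min_lt_iff.mp hlt2 with h | h
                  · exact absurd h hw
                  · exact h
                obtain ⟨i₀, hf, he⟩ := ih1 (Or.inr ⟨m0, rfl, hxlt⟩)
                have hmm : (x :: xt).foldl min w = xt.foldl min x := by
                  rw [hm]; exact min_eq_right (le_of_lt (lt_of_lt_of_le hxlt hm0w))
                refine ⟨i₀, ?_, ?_⟩
                · rw [hmm, List.find?_cons_of_neg (by simp [hg]; omega)]
                  exact hf
                · rw [hmm]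
                  simpa [List.foldl_cons, hstep] using he
        · intro m0 hom hnlt
          subst hom
          have hw0 : ¬ w < m0 := fun h => hnlt (lt_of_le_of_lt (foldl_min_le_init _ _) h)
          have hstep : pvStepA keys (j, some m0) i = (j, some m0) := by
            simp [pvStepA, hg, hw0]
          cases hvt : t.filterMap (pvKey keys) with
          | nil =>
            simpa [List.foldl_cons, hstep] using (ih j (some m0)).1 hvt
          | cons x xt =>
            obtain ⟨_, ih2⟩ := (ih j (some m0)).2 x xt hvt
            have hm : (x :: xt).foldl min w = min w (xt.foldl min x) := by
              rw [List.foldl_cons]; exact foldl_min_comm xt w x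
            have hnlt' : ¬ xt.foldl min x < m0 := by
              intro h
              apply hnlt
              rw [hvt, hm]
              exact lt_of_le_of_lt (min_le_right _ _) h
            simpa [List.foldl_cons, hstep] using ih2 m0 rfl hnlt'

-- ===== VERDICT (by name: the statement is the Claim_ definition above) =====
theorem minInIndicies_spec : Claim_equal_minInIndicies := by
  intro keys indicies _ hpre
  obtain ⟨hne, _⟩ := hpre
  match indicies with
  | [] => exact absurd rfl hne
  | hd :: tl =>
    have hi0 : (PySem.List.pyGet? (hd :: tl) 0).getD 0 = hd := by
      simp [PySem.List.pyGet?, PySem.List.pyIdx?]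
    show minInIndicies keys (hd :: tl) = minInIndicies_alt keys (hd :: tl)
    unfold minInIndicies minInIndicies_alt
    rw [hi0]
    cases hv : (hd :: tl).filterMap (pvKey keys) with
    | nil =>
      have hA := (foldA_char keys (hd :: tl) hd (pvKey keys hd)).1 hv
      rw [hA]
      rfl
    | cons v vt =>
      obtain ⟨br1, br2⟩ := (foldA_char keys (hd :: tl) hd (pvKey keys hd)).2 v vt hv
      have hmin : PySem.List.min? (v :: vt) (fun x => x) = some (vt.foldl min v) :=
        PySem.List.min?_id_cons v vt
      rw [hmin]
      cases hg : pvKey keys hd with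
      | none =>
        obtain ⟨i₀, hf, he⟩ := br1 (Or.inl hg)
        rw [hg] at he
        rw [he]
        simp [hf]
      | some m0 =>
        -- hd's key is the head of the filtered values
        have hvhead : v = m0 ∧ vt = tl.filterMap (pvKey keys) := by
          have h2 : (hd :: tl).filterMap (pvKey keys) = m0 :: tl.filterMap (pvKey keys) := by
            simp [hg]
          rw [hv] at h2
          injection h2 with ha hb
          exact ⟨ha, hb⟩
        obtain ⟨rfl, _⟩ := hvhead
        by_cases hlt : vt.foldl min v < v
        · obtain ⟨i₀, hf, he⟩ := br1 (Or.inr ⟨v, hg, hlt⟩)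
          rw [hg] at he
          rw [he]
          simp [hf]
        · have he := br2 v hg hlt
          rw [hg] at he
          have hm : vt.foldl min v = v :=
            le_antisymm (foldl_min_le_init _ _) (le_of_not_gt hlt)
          have hfind : List.find? (fun i => pvKey keys i == some v) (hd :: tl) = some hd :=
            List.find?_cons_of_pos (by simp [hg])
          rw [he, hm]
          simp [hfind]
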